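-- pv_equiv track=rewrite | github.com/guerinileonardo/overlap | tools.py | first_neighbours_indices
-- ===== SOURCE A (Python) =====
-- def first_neighbours_indices(control, target):
--     '''
--     Returns the indices involved in the decomposition of a CNOT between qubits
--     'control' and 'target' into first-neighbours CNOTs.
--     '''
--     ind = []
--     distance = abs(control-target)
--     if control < target:
--         for i in range(distance-1):
--             ind.append([control+i+1, control+i])
--             ind.append([control+i, control+i+1])
--         ind.append([control+distance-1, target])
--         for i in range(distance-2, -1, -1):
--             ind.append([control+i, control+i+1])
--             ind.append([control+i+1, control+i])
--     elif control > target: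
--         for i in range(distance-1):
--             ind.append([control-i-1, control-i])
--             ind.append([control-i, control-i-1])
--         ind.append([control-distance+1, target])
--         for i in range(distance-2, -1, -1):
--             ind.append([control-i, control-i-1])
--             ind.append([control-i-1, control-i])
--     return(ind)
-- ===== SOURCE B (Python) =====
-- def first_neighbours_indices(control, target):
--     '''
--     Returns the indices involved in the decomposition of a CNOT between qubits
--     'control' and 'target' into first-neighbours CNOTs.
--     '''
--     d = abs(control - target)
--     if d == 0:
--         return []
--     s = 1 if control < target else -1
--     L = 4 * d - 3
--     out = []
--     for j in range(L):
--         m = min(j, L - 1 - j)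
--         if m == 2 * d - 2:
--             out.append([control + s * (d - 1), target])
--         else:
--             i, r = divmod(m, 2)
--             if r == 0:
--                 out.append([control + s * (i + 1), control + s * i])
--             else:
--                 out.append([control + s * i, control + s * (i + 1)])
--     return out
-- ===== Notes on version B (the rewrite author's own statement) =====
-- stated objective: alternative
-- what changed: A builds the sequence in three sequential phases (ascending pair loop, middle edge, separate descending loop, duplicated per direction); B instead computes each output pair directly from its position index via the palindrome symmetry m = min(j, L-1-j) and a divmod block formula, in one direction-agnostic loop over output positions.
import Mathlib
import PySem

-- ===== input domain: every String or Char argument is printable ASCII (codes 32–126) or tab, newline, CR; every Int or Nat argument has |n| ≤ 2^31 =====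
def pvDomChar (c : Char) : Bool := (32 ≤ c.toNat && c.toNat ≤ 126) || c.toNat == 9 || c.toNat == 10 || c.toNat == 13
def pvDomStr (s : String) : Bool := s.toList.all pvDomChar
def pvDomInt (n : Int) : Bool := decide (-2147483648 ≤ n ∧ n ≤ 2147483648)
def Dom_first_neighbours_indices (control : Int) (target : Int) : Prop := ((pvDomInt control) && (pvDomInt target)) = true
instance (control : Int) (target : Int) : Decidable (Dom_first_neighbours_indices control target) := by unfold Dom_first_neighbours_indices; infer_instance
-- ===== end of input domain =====

-- B replaces A's three sequential phases (ascending loop, middle edge, descending loop, per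
-- direction) by a closed-form per-position construction: each output pair is computed directly
-- from its index j via the palindrome symmetry m = min(j, L-1-j); 'alternative' objective.

-- ===== PORT A =====
def first_neighbours_indices (control : Int) (target : Int) : List (List Int) :=
  let ind : List (List Int) := []
  let distance : Int := |control - target|
  if control < target then
    let ind := (PySem.List.pyRange 0 (distance - 1) 1).foldl
      (fun acc i => acc ++ [[control + i + 1, control + i], [control + i, control + i + 1]]) ind
    let ind := ind ++ [[control + distance - 1, target]]
    (PySem.List.pyRange (distance - 2) (-1) (-1)).foldl
      (fun acc i => acc ++ [[control + i, control + i + 1], [control + i + 1, control + i]]) ind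
  else if control > target then
    let ind := (PySem.List.pyRange 0 (distance - 1) 1).foldl
      (fun acc i => acc ++ [[control - i - 1, control - i], [control - i, control - i - 1]]) ind
    let ind := ind ++ [[control - distance + 1, target]]
    (PySem.List.pyRange (distance - 2) (-1) (-1)).foldl
      (fun acc i => acc ++ [[control - i, control - i - 1], [control - i - 1, control - i]]) ind
  else ind

-- ===== PORT B =====
-- divmod(m, 2) is ported as (PySem.Int.floordiv m 2, PySem.Int.mod m 2): exact, the divisor is
-- the constant 2; min(j, L-1-j) is Int.min.
def first_neighbours_indices_alt (control : Int) (target : Int) : List (List Int) :=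
  let d : Int := |control - target|
  if d = 0 then []
  else
    let s : Int := if control < target then 1 else -1
    let L : Int := 4 * d - 3
    (PySem.List.pyRange 0 L 1).foldl
      (fun out j =>
        let m := min j (L - 1 - j)
        if m = 2 * d - 2 then out ++ [[control + s * (d - 1), target]]
        else
          let i := PySem.Int.floordiv m 2
          let r := PySem.Int.mod m 2
          if r = 0 then out ++ [[control + s * (i + 1), control + s * i]]
          else out ++ [[control + s * i, control + s * (i + 1)]]) []

-- ===== PRECONDITION & SPEC =====
def Spec_first_neighbours_indices (control : Int) (target : Int) (out : List (List Int)) : Prop := out = first_neighbours_indices_alt control target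
instance (control : Int) (target : Int) (out : List (List Int)) : Decidable (Spec_first_neighbours_indices control target out) := by unfold Spec_first_neighbours_indices; infer_instance

-- ===== CLAIM (what is proved, stated in full; the proofs are below) =====
def Claim_equal_first_neighbours_indices : Prop := ∀ (control : Int) (target : Int), Dom_first_neighbours_indices control target → Spec_first_neighbours_indices control target (first_neighbours_indices control target)

-- ===== LEMMAS AND PROOFS =====

-- B's per-position pair, as a function of the position j (proof-side helper).
def pvG (c t s d j : Int) : List Int :=
  let m := min j (4 * d - 3 - 1 - j)
  if m = 2 * d - 2 then [c + s * (d - 1), t]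
  else
    let i := PySem.Int.floordiv m 2
    let r := PySem.Int.mod m 2
    if r = 0 then [c + s * (i + 1), c + s * i]
    else [c + s * i, c + s * (i + 1)]

theorem pv_alt_map (c t : Int) (h : ¬ (|c - t| = 0)) :
    first_neighbours_indices_alt c t
      = List.map (pvG c t (if c < t then 1 else -1) |c - t|)
          (PySem.List.pyRange 0 (4 * |c - t| - 3) 1) := by
  unfold first_neighbours_indices_alt
  simp only [h, if_false]
  have hfun : (fun (out : List (List Int)) (j : Int) =>
      let m := min j (4 * |c - t| - 3 - 1 - j)
      if m = 2 * |c - t| - 2 then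
        out ++ [[c + (if c < t then 1 else -1) * (|c - t| - 1), t]]
      else
        let i := PySem.Int.floordiv m 2
        let r := PySem.Int.mod m 2
        if r = 0 then
          out ++ [[c + (if c < t then 1 else -1) * (i + 1), c + (if c < t then 1 else -1) * i]]
        else out ++ [[c + (if c < t then 1 else -1) * i, c + (if c < t then 1 else -1) * (i + 1)]])
      = fun out j => out ++ [pvG c t (if c < t then 1 else -1) (|c - t|) j] := by
    funext out j
    simp only [pvG]
    split_ifs <;> rfl
  rw [hfun, PySem.List.foldl_append_eq_flatMap, List.nil_append, ← List.map_eq_flatMap]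

-- Pairing: a flatMap of two-element blocks over range n is the map over range 2n.
theorem pv_pairs {α : Type} (g : Int → α) (P : Int → List α) :
    ∀ (n : Nat), (∀ k : Nat, k < n → P (k : Int) = [g (2 * (k : Int)), g (2 * (k : Int) + 1)]) →
      List.flatMap P (PySem.List.pyRange 0 (n : Int) 1)
        = List.map g (PySem.List.pyRange 0 (2 * (n : Int)) 1) := by
  intro n
  induction n with
  | zero => intro _; simp [PySem.List.pyRange_one_eq_nil]
  | succ n ih =>
    intro h
    have e1 : ((n + 1 : Nat) : Int) = (n : Int) + 1 := by push_cast; ring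
    rw [e1, show (2 * ((n : Int) + 1)) = (2 * (n : Int) + 1) + 1 from by ring,
        PySem.List.pyRange_one_succ_right (by positivity),
        PySem.List.pyRange_one_succ_right (by positivity),
        show (2 * (n : Int) + 1) = (2 * (n : Int)) + 1 from rfl,
        PySem.List.pyRange_one_succ_right (by positivity)]
    rw [List.flatMap_append, List.map_append, List.map_append,
        ih (fun k hk => h k (Nat.lt_succ_of_lt hk))]
    simp [h n (Nat.lt_succ_self n)]

-- Reflection: the upper half of the position range maps to the reverse of the lower half,
-- for any per-position function symmetric under j ↦ 4d-4-j.
theorem pv_seg3 {α : Type} (g : Int → α) (d : Int) (hd : 1 ≤ d)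
    (hsym : ∀ j : Int, g j = g (4 * d - 4 - j)) :
    List.map g (PySem.List.pyRange (2 * d - 1) (4 * d - 3) 1)
      = (List.map g (PySem.List.pyRange 0 (2 * d - 2) 1)).reverse := by
  have hrev : (PySem.List.pyRange 0 (2 * d - 2) 1).reverse
      = PySem.List.pyRange (2 * d - 3) (-1) (-1) := by
    rw [PySem.List.pyRange_neg_one_eq_reverse,
        show ((-1 : Int) + 1) = 0 from by ring,
        show ((2 * d - 3 : Int) + 1) = 2 * d - 2 from by ring]
  rw [← List.map_reverse, hrev, PySem.List.pyRange_neg_one, PySem.List.pyRange_one,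
      List.map_map, List.map_map]
  have hlen : (2 * d - 3 - (-1)).toNat = (4 * d - 3 - (2 * d - 1)).toNat := by omega
  rw [← hlen]
  apply List.map_congr_left
  intro k _
  simp only [Function.comp_apply]
  have := hsym (2 * d - 1 + (k : Int))
  rw [this]
  congr 1
  omega

theorem pv_fdiv2_even (k : Int) : PySem.Int.floordiv (2 * k) 2 = k := by
  rw [PySem.Int.floordiv_eq_ediv_of_pos (by omega)]; omega

theorem pv_fdiv2_odd (k : Int) : PySem.Int.floordiv (2 * k + 1) 2 = k := by
  rw [PySem.Int.floordiv_eq_ediv_of_pos (by omega)]; omega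

theorem pv_mod2_even (k : Int) : PySem.Int.mod (2 * k) 2 = 0 := by
  rw [PySem.Int.mod_eq_emod_of_pos (by omega)]; omega

theorem pv_mod2_odd (k : Int) : PySem.Int.mod (2 * k + 1) 2 = 1 := by
  rw [PySem.Int.mod_eq_emod_of_pos (by omega)]; omega

-- pvG evaluated on the lower half: even position 2k, odd position 2k+1, middle 2d-2.
theorem pv_g_even (c t s d k : Int) (_h0 : 0 ≤ k) (hk : k < d - 1) :
    pvG c t s d (2 * k) = [c + s * (k + 1), c + s * k] := by
  unfold pvG
  have hmin : min (2 * k) (4 * d - 3 - 1 - 2 * k) = 2 * k := by omega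
  rw [hmin, if_neg (by omega), pv_fdiv2_even, pv_mod2_even, if_pos rfl]

theorem pv_g_odd (c t s d k : Int) (_h0 : 0 ≤ k) (hk : k < d - 1) :
    pvG c t s d (2 * k + 1) = [c + s * k, c + s * (k + 1)] := by
  unfold pvG
  have hmin : min (2 * k + 1) (4 * d - 3 - 1 - (2 * k + 1)) = 2 * k + 1 := by omega
  rw [hmin, if_neg (by omega), pv_fdiv2_odd, pv_mod2_odd, if_neg (by omega)]

theorem pv_g_mid (c t s d : Int) (_hd : 1 ≤ d) :
    pvG c t s d (2 * d - 2) = [c + s * (d - 1), t] := by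
  unfold pvG
  have hmin : min (2 * d - 2) (4 * d - 3 - 1 - (2 * d - 2)) = 2 * d - 2 := by omega
  rw [hmin, if_pos rfl]

theorem pv_g_sym (c t s d : Int) (j : Int) : pvG c t s d j = pvG c t s d (4 * d - 4 - j) := by
  unfold pvG
  have : min (4 * d - 4 - j) (4 * d - 3 - 1 - (4 * d - 4 - j)) = min j (4 * d - 3 - 1 - j) := by
    omega
  rw [this]

-- B as three segments: lower half = the two-element blocks, middle, upper half = reverse.
theorem pv_alt_split (c t s d : Int) (hd : 1 ≤ d) (P : Int → List (List Int))
    (hP : ∀ k : Int, 0 ≤ k → k < d - 1 → P k = [pvG c t s d (2 * k), pvG c t s d (2 * k + 1)]) :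
    List.map (pvG c t s d) (PySem.List.pyRange 0 (4 * d - 3) 1)
      = List.flatMap P (PySem.List.pyRange 0 (d - 1) 1) ++ [[c + s * (d - 1), t]]
        ++ (List.flatMap P (PySem.List.pyRange 0 (d - 1) 1)).reverse := by
  have hseg1 : List.flatMap P (PySem.List.pyRange 0 (d - 1) 1)
      = List.map (pvG c t s d) (PySem.List.pyRange 0 (2 * d - 2) 1) := by
    have e1 : (d - 1 : Int) = (((d - 1).toNat : Nat) : Int) := by omega
    have e2 : (2 * d - 2 : Int) = 2 * (((d - 1).toNat : Nat) : Int) := by omega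
    rw [e1, e2]
    apply pv_pairs
    intro k hk
    exact hP k (by positivity) (by omega)
  rw [PySem.List.pyRange_one_append 0 (2 * d - 2) (4 * d - 3) (by omega) (by omega),
      PySem.List.pyRange_one_append (2 * d - 2) (2 * d - 1) (4 * d - 3) (by omega) (by omega),
      List.map_append, List.map_append]
  rw [show (2 * d - 1 : Int) = (2 * d - 2) + 1 from by ring, PySem.List.pyRange_one_singleton]
  rw [show (2 * d - 2 : Int) + 1 = 2 * d - 1 from by ring]
  rw [pv_seg3 (pvG c t s d) d hd (pv_g_sym c t s d), hseg1]
  simp [pv_g_mid c t s d hd]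

theorem pv_main (c t : Int) : first_neighbours_indices c t = first_neighbours_indices_alt c t := by
  rcases lt_trichotomy c t with hlt | heq | hgt
  · have habs : |c - t| = t - c := by rw [abs_sub_comm]; exact abs_of_nonneg (by omega)
    have hs : (if c < t then (1 : Int) else -1) = 1 := if_pos hlt
    rw [pv_alt_map c t (by omega), habs, hs]
    simp only [first_neighbours_indices, if_pos hlt, habs,
      PySem.List.foldl_append_eq_flatMap, List.nil_append]
    rw [pv_alt_split c t 1 (t - c) (by omega)
      (P := fun x => [[c + x + 1, c + x], [c + x, c + x + 1]])
      (by intro k h0 hk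
          rw [pv_g_even c t 1 (t - c) k h0 hk, pv_g_odd c t 1 (t - c) k h0 hk]
          simp only [List.cons.injEq, and_true]
          omega)]
    rw [PySem.List.pyRange_neg_one_eq_reverse]
    have e3 : (-1 : Int) + 1 = 0 := by ring
    have e4 : t - c - 2 + 1 = t - c - 1 := by ring
    rw [e3, e4, List.flatMap_reverse]
    have hg : (List.reverse ∘ (fun x : Int => [[c + x, c + x + 1], [c + x + 1, c + x]]))
        = (fun x : Int => [[c + x + 1, c + x], [c + x, c + x + 1]]) := by
      funext x; simp
    rw [hg]
    have hmid : c + (t - c) - 1 = c + 1 * (t - c - 1) := by ring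
    rw [hmid]
  · simp [first_neighbours_indices, first_neighbours_indices_alt, heq]
  · have habs : |c - t| = c - t := abs_of_nonneg (by omega)
    have hnlt : ¬ c < t := by omega
    have hs : (if c < t then (1 : Int) else -1) = -1 := if_neg hnlt
    rw [pv_alt_map c t (by omega), habs, hs]
    simp only [first_neighbours_indices, if_pos hgt, if_neg hnlt, habs,
      PySem.List.foldl_append_eq_flatMap, List.nil_append]
    rw [pv_alt_split c t (-1) (c - t) (by omega)
      (P := fun x => [[c - x - 1, c - x], [c - x, c - x - 1]])
      (by intro k h0 hk
          rw [pv_g_even c t (-1) (c - t) k h0 hk, pv_g_odd c t (-1) (c - t) k h0 hk]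
          simp only [List.cons.injEq, and_true]
          omega)]
    rw [PySem.List.pyRange_neg_one_eq_reverse]
    have e3 : (-1 : Int) + 1 = 0 := by ring
    have e4 : c - t - 2 + 1 = c - t - 1 := by ring
    rw [e3, e4, List.flatMap_reverse]
    have hg : (List.reverse ∘ (fun x : Int => [[c - x, c - x - 1], [c - x - 1, c - x]]))
        = (fun x : Int => [[c - x - 1, c - x], [c - x, c - x - 1]]) := by
      funext x; simp
    rw [hg]
    have hmid : c - (c - t) + 1 = c + (-1) * (c - t - 1) := by ring
    rw [hmid]

-- ===== VERDICT (by name: the statement is the Claim_ definition above) =====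
theorem first_neighbours_indices_spec : Claim_equal_first_neighbours_indices := by
  intro c t _
  unfold Spec_first_neighbours_indices
  exact pv_main c t
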